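-- pv_equiv track=rewrite | github.com/anryangelov/hackbg_programming101 | week01/firstday.py | fib_number
-- ===== SOURCE A (Python) =====
-- def to_digits(n):
--     res = []
--     while n > 10:
--         res.insert(0, (n % 10))
--         n = n // 10
--     res.insert(0, n)
--     return res
--
-- def to_number(digits):
--     res = 0
--     small_digits = []
--     for number in digits:
--         if number > 9:
--             for digit in to_digits(number):
--                 small_digits.append(digit)
--         else:
--             small_digits.append(number)
--     l = len(small_digits) - 1
--     for digit in small_digits:
--         res += digit * (10**l)
--         l -= 1
--     return res
--
-- def fibonacci(n):
--     res = []
--     a = 1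
--     b = 1
--     while n > 0:
--         res.append(a)
--         a, b = b, a + b
--         n -= 1
--     return res
--
-- def fib_number(n):
--     digits = []
--     for number in fibonacci(n):
--         if number > 9:
--             for digit in to_digits(number):
--                 digits.append(digit)
--         else:
--             digits.append(number)
--     return to_number(digits)
-- ===== SOURCE B (Python) =====
-- def fib_number(n):
--     # Single shift-and-add pass over whole Fibonacci numbers: no digit lists,
--     # no positional re-assembly.  The inner width loop keeps A's
--     # digit-grouping convention (it stops once m is at most ten).
--     res = 0
--     a, b = 1, 1
--     while n > 0:
--         w, m = 1, a
--         while m > 10: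
--             m //= 10
--             w += 1
--         res = res * 10 ** w + a
--         a, b = b, a + b
--         n -= 1
--     return res
-- ===== Notes on version B (the rewrite author's own statement) =====
-- stated objective: simpler
-- what changed: Replaces A's digit-explosion into lists (twice) plus a final per-digit positional fold with a single O(1)-space shift-and-add loop over whole Fibonacci numbers: res = res * ten**width(f) + f.
import Mathlib
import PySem

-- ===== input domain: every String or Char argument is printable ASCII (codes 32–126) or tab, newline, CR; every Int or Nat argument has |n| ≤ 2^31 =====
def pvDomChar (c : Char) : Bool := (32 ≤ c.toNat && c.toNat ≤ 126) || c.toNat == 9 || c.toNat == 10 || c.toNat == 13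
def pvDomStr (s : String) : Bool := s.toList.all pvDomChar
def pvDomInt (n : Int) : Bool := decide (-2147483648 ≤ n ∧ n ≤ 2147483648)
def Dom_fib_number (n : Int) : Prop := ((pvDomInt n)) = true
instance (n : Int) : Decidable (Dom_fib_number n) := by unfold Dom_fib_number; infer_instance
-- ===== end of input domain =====

-- B replaces A's digit-explosion lists and positional fold with one shift-and-add pass (objective: simpler).

-- ===== PORT A =====
-- to_digits: the `while n > 10` loop, building the list front-to-back by recursion
def toDigits (n : Int) : List Int :=
  if _h : n > 10 then toDigits (PySem.Int.floordiv n 10) ++ [PySem.Int.mod n 10]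
  else [n]
termination_by n.toNat
decreasing_by
  have h10 : PySem.Int.floordiv n 10 = n / 10 := PySem.Int.floordiv_eq_ediv_of_pos (by omega)
  omega

-- positional loop of to_number: res += digit * 10**l; l -= 1
-- (10**l is only evaluated with l ≥ 0: the loop body runs only on nonempty lists,
--  where l starts at len-1 ≥ 0 and reaches 0 at the last element)
def posLoop : List Int → Int → Int → Int
  | [], res, _ => res
  | d :: ds, res, l => posLoop ds (res + d * 10 ^ l.toNat) (l - 1)

def to_number (digits : List Int) : Int :=
  let small := digits.foldl (fun acc number => if number > 9 then acc ++ toDigits number else acc ++ [number]) []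
  posLoop small 0 ((small.length : Int) - 1)

def fibLoop (n a b : Int) : List Int :=
  if n > 0 then a :: fibLoop (n - 1) b (a + b) else []
termination_by n.toNat
decreasing_by omega

def fibonacci (n : Int) : List Int := fibLoop n 1 1

def fib_number (n : Int) : Int :=
  let digits := (fibonacci n).foldl (fun acc number => if number > 9 then acc ++ toDigits number else acc ++ [number]) []
  to_number digits

-- ===== PORT B =====
-- inner `while m > 10` width loop of Source B
def widthLoop (w m : Int) : Int :=
  if h : m > 10 then widthLoop (w + 1) (PySem.Int.floordiv m 10) else w
termination_by m.toNat
decreasing_by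
  have h10 : PySem.Int.floordiv m 10 = m / 10 := PySem.Int.floordiv_eq_ediv_of_pos (by omega)
  omega

-- outer `while n > 0` loop of Source B
def bLoop (n a b res : Int) : Int :=
  if n > 0 then bLoop (n - 1) b (a + b) (res * 10 ^ (widthLoop 1 a).toNat + a) else res
termination_by n.toNat
decreasing_by omega

def fib_number_alt (n : Int) : Int := bLoop n 1 1 0

-- ===== PRECONDITION & SPEC =====
def Spec_fib_number (n : Int) (out : Int) : Prop := out = fib_number_alt n
instance (n : Int) (out : Int) : Decidable (Spec_fib_number n out) := by unfold Spec_fib_number; infer_instance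

-- ===== CLAIM (what is proved, stated in full; the proofs are below) =====
def Claim_equal_fib_number : Prop := ∀ (n : Int), Dom_fib_number n → Spec_fib_number n (fib_number n)

-- ===== LEMMAS AND PROOFS =====

-- Horner-style value of a digit list
def horner (a : Int) (ds : List Int) : Int := ds.foldl (fun r d => r * 10 + d) a

theorem horner_nil (a : Int) : horner a [] = a := rfl

theorem horner_cons (a d : Int) (ds : List Int) :
    horner a (d :: ds) = horner (a * 10 + d) ds := by simp [horner]

theorem horner_append (a : Int) (xs ys : List Int) :
    horner a (xs ++ ys) = horner (horner a xs) ys := by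
  simp [horner, List.foldl_append]

theorem horner_shift (ds : List Int) : ∀ a : Int,
    horner a ds = a * 10 ^ ds.length + horner 0 ds := by
  induction ds with
  | nil => intro a; simp [horner]
  | cons d ds ih =>
    intro a
    have h2 : horner 0 (d :: ds) = horner d ds := by simp [horner]
    rw [horner_cons, h2, ih (a * 10 + d), ih d, List.length_cons]
    ring

-- the positional loop of to_number is Horner evaluation
theorem posLoop_eq (ds : List Int) : ∀ res : Int,
    posLoop ds res ((ds.length : Int) - 1) = res + horner 0 ds := by
  induction ds with
  | nil => intro res; simp [posLoop, horner]
  | cons d ds ih =>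
    intro res
    have hlen : ((d :: ds).length : Int) - 1 = (ds.length : Int) := by
      push_cast [List.length_cons]; ring
    rw [hlen]
    show posLoop ds (res + d * 10 ^ ((ds.length : Int)).toNat) ((ds.length : Int) - 1) = _
    rw [ih]
    have ht : ((ds.length : Int)).toNat = ds.length := by omega
    rw [ht]
    have h2 : horner 0 (d :: ds) = horner d ds := by simp [horner]
    rw [h2, horner_shift ds d]
    ring

-- toDigits of a small value is the singleton
theorem toDigits_of_le (n : Int) (h : n ≤ 10) : toDigits n = [n] := by
  rw [toDigits]; simp [show ¬ n > 10 by omega]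

-- every entry of toDigits is ≤ 10
theorem toDigits_le (n : Int) : ∀ d ∈ toDigits n, d ≤ 10 := by
  induction n using toDigits.induct with
  | case1 n h ih =>
    rw [toDigits]; simp only [h, dite_true]
    intro d hd
    rcases List.mem_append.mp hd with h1 | h1
    · exact ih d h1
    · simp only [List.mem_singleton] at h1
      have := PySem.Int.mod_lt n (b := 10) (by omega)
      omega
  | case2 n h =>
    rw [toDigits]; simp only [h, dite_false]
    intro d hd
    simp only [List.mem_singleton] at hd
    omega

-- the digit-building foldl is a flatMap over toDigits
theorem foldl_chunk (xs : List Int) : ∀ acc : List Int,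
    xs.foldl (fun acc number => if number > 9 then acc ++ toDigits number else acc ++ [number]) acc
      = acc ++ xs.flatMap toDigits := by
  induction xs with
  | nil => intro acc; simp
  | cons x xs ih =>
    intro acc
    show List.foldl _ (if x > 9 then acc ++ toDigits x else acc ++ [x]) xs = _
    have hc : (if x > 9 then acc ++ toDigits x else acc ++ [x]) = acc ++ toDigits x := by
      split
      · rfl
      · rw [toDigits_of_le x (by omega)]
    rw [hc, ih]
    simp [List.flatMap_cons]

-- exploding a list whose entries are all ≤ 10 is the identity
theorem flatMap_toDigits_id (ys : List Int) (h : ∀ d ∈ ys, d ≤ 10) :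
    ys.flatMap toDigits = ys := by
  induction ys with
  | nil => simp
  | cons y ys ih =>
    simp only [List.flatMap_cons]
    rw [toDigits_of_le y (h y (by simp)), ih (fun d hd => h d (by simp [hd]))]
    simp

-- Horner over toDigits n reconstructs n, shifted by its digit-group count
theorem horner_toDigits (n : Int) : ∀ a : Int,
    horner a (toDigits n) = a * 10 ^ (toDigits n).length + n := by
  induction n using toDigits.induct with
  | case1 n h ih =>
    intro a
    rw [toDigits]; simp only [h, dite_true]
    rw [horner_append, ih a]
    have hmd := PySem.Int.floordiv_mul_add_mod n 10
    rw [horner_cons, horner_nil]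
    simp only [List.length_append, List.length_cons, List.length_nil]
    rw [pow_succ]
    nlinarith [hmd]
  | case2 n h =>
    intro a
    rw [toDigits]; simp only [h, dite_false]
    rw [horner_cons, horner_nil]
    norm_num

-- the width loop counts the digit groups of toDigits
theorem widthLoop_eq (w m : Int) :
    widthLoop w m = w + ((toDigits m).length : Int) - 1 := by
  induction w, m using widthLoop.induct with
  | case1 w m h ih =>
    rw [widthLoop]; simp only [h, dite_true]
    rw [ih]
    conv_rhs => rw [toDigits]
    simp only [h, dite_true, List.length_append, List.length_cons, List.length_nil]
    push_cast
    ring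
  | case2 w m h =>
    rw [widthLoop]; simp only [h, dite_false]
    rw [toDigits_of_le m (by omega)]
    simp

-- B's loop is Horner evaluation of the exploded Fibonacci list
theorem bLoop_eq (n a b res : Int) :
    bLoop n a b res = horner res ((fibLoop n a b).flatMap toDigits) := by
  induction n, a, b, res using bLoop.induct with
  | case1 n a b res h ih =>
    rw [bLoop, fibLoop]; simp only [h, if_pos]
    rw [ih]
    rw [List.flatMap_cons, horner_append, horner_toDigits a res]
    have hw : (widthLoop 1 a).toNat = (toDigits a).length := by
      rw [widthLoop_eq]; omega
    rw [hw]
  | case2 n a b res h =>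
    rw [bLoop, fibLoop]; simp only [h, if_false]
    simp [horner]

-- ===== VERDICT (by name: the statement is the Claim_ definition above) =====
theorem fib_number_spec : Claim_equal_fib_number := by
  intro n _
  show fib_number n = fib_number_alt n
  simp only [fib_number, fib_number_alt, fibonacci, to_number]
  rw [foldl_chunk, List.nil_append, foldl_chunk, List.nil_append]
  have hle : ∀ d ∈ (fibLoop n 1 1).flatMap toDigits, d ≤ 10 := by
    intro d hd
    rcases List.mem_flatMap.mp hd with ⟨x, _, hdx⟩
    exact toDigits_le x d hdx
  rw [flatMap_toDigits_id _ hle, posLoop_eq, bLoop_eq]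
  simp
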